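-- pv_equiv track=rewrite | github.com/vama89/vernal-period-757 | voting.py | inViteVote
-- ===== SOURCE A (Python) =====
-- def inViteVote(groupRankVotes):
--     option1Count=0
--     option2Count=0
--     option3Count=0
--
--     for votes in groupRankVotes:
--         option1Count=option1Count+votes[0]
--         option2Count=option2Count+votes[1]
--         option3Count=option3Count+votes[2]
--
--     results = [option1Count, option2Count, option3Count]
--     finalResults=[]
--     adjusterCount = max(results)+1
--     #The least counted vote is the one most in demand via first preference.
--     #this flips the results to make the least number, the "most wanted" in our decimal system
--     for count in results:
--         adjusted = adjusterCount-count
--         finalResults.append(adjusted)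
--
--     """
--     result = {option1Count:1, option2Count:2, option3Count:3}
--     rankings = result.keys()
--
--     finalTally=[]
--     for num in rankings:
--         finalTally.append(result[num])
--     """
--
--     #return finalTally
--     return finalResults
-- ===== SOURCE B (Python) =====
-- def inViteVote(groupRankVotes):
--     def colSums(rows):
--         if not rows:
--             return [0, 0, 0]
--         if len(rows) == 1:
--             v = rows[0]
--             return [v[0], v[1], v[2]]
--         mid = len(rows) // 2
--         left = colSums(rows[:mid])
--         right = colSums(rows[mid:])
--         return [left[0] + right[0], left[1] + right[1], left[2] + right[2]]
--
--     results = colSums(groupRankVotes)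
--     adjuster = max(results) + 1
--     return [adjuster - c for c in results]
-- ===== Notes on version B (the rewrite author's own statement) =====
-- stated objective: alternative
-- what changed: Replaces the linear loop that accumulates three counters row by row with a divide-and-conquer recursion that splits the vote list in half and adds the two column-sum vectors, then applies the max+1 inversion by a comprehension.
import Mathlib
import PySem

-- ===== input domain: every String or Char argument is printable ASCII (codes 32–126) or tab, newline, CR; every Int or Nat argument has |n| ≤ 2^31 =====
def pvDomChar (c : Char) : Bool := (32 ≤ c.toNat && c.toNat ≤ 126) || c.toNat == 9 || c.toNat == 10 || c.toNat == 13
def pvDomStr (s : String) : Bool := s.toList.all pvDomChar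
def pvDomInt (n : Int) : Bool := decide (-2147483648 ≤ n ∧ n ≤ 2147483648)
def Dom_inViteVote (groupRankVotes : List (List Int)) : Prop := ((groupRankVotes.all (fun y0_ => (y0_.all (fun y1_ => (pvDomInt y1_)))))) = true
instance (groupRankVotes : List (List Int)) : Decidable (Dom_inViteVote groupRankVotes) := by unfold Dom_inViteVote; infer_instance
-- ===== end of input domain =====

-- B replaces A's single loop that accumulates three counters row by row with a
-- divide-and-conquer recursion adding column-sum vectors of the two halves — alternative decomposition, same cost.

-- ===== PORT A =====
-- one pass maintaining the three counters together, then max+1 and an append loop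
def inViteVote (groupRankVotes : List (List Int)) : List Int :=
  let acc := groupRankVotes.foldl
    (fun (s : Int × Int × Int) votes =>
      (s.1 + PySem.List.pyGetD votes 0 0,
       s.2.1 + PySem.List.pyGetD votes 1 0,
       s.2.2 + PySem.List.pyGetD votes 2 0)) (0, 0, 0)
  let results : List Int := [acc.1, acc.2.1, acc.2.2]
  let adjusterCount : Int := ((PySem.List.max? results (fun x => x)).getD 0) + 1
  results.foldl (fun (fin : List Int) count => fin ++ [adjusterCount - count]) []

-- ===== PORT B =====
-- divide and conquer: column sums of the two halves of the list, added componentwise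
def pvColSums (rows : List (List Int)) : List Int :=
  match rows with
  | [] => [0, 0, 0]
  | [v] => [PySem.List.pyGetD v 0 0, PySem.List.pyGetD v 1 0, PySem.List.pyGetD v 2 0]
  | a :: b :: rest =>
    let mid := (a :: b :: rest).length / 2
    let left := pvColSums ((a :: b :: rest).take mid)
    let right := pvColSums ((a :: b :: rest).drop mid)
    [PySem.List.pyGetD left 0 0 + PySem.List.pyGetD right 0 0,
     PySem.List.pyGetD left 1 0 + PySem.List.pyGetD right 1 0,
     PySem.List.pyGetD left 2 0 + PySem.List.pyGetD right 2 0]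
termination_by rows.length
decreasing_by
  · simp [List.length_take]; omega
  · simp [List.length_drop]; omega

def inViteVote_alt (groupRankVotes : List (List Int)) : List Int :=
  let results := pvColSums groupRankVotes
  let adjuster : Int := ((PySem.List.max? results (fun x => x)).getD 0) + 1
  results.map (fun c => adjuster - c)

-- ===== PRECONDITION & SPEC =====
-- Pre_ excludes rows shorter than 3, on which the Python A (votes[2]) raises IndexError (B raises too).
def Pre_inViteVote (groupRankVotes : List (List Int)) : Prop :=
  ∀ v ∈ groupRankVotes, 3 ≤ v.length
instance (groupRankVotes : List (List Int)) : Decidable (Pre_inViteVote groupRankVotes) := by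
  unfold Pre_inViteVote; infer_instance
def pvWitness_inViteVote : List (List Int) := [[1, 2, 3], [0, 5, 1]]
def Spec_inViteVote (groupRankVotes : List (List Int)) (out : List Int) : Prop := out = inViteVote_alt groupRankVotes
instance (groupRankVotes : List (List Int)) (out : List Int) : Decidable (Spec_inViteVote groupRankVotes out) := by unfold Spec_inViteVote; infer_instance

-- ===== CLAIM (what is proved, stated in full; the proofs are below) =====
def Claim_equal_inViteVote : Prop := ∀ (groupRankVotes : List (List Int)), Dom_inViteVote groupRankVotes → Pre_inViteVote groupRankVotes → Spec_inViteVote groupRankVotes (inViteVote groupRankVotes)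

-- ===== LEMMAS AND PROOFS =====

-- B's divide-and-conquer recursion computes the three column sums.
theorem pvColSums_eq (rows : List (List Int)) :
    pvColSums rows =
      [(rows.map (fun v => PySem.List.pyGetD v 0 0)).sum,
       (rows.map (fun v => PySem.List.pyGetD v 1 0)).sum,
       (rows.map (fun v => PySem.List.pyGetD v 2 0)).sum] := by
  induction rows using pvColSums.induct with
  | case1 => simp [pvColSums]
  | case2 v => simp [pvColSums]
  | case3 a b rest mid ih1 ih2 =>
    rw [pvColSums]
    rw [ih1, ih2]
    conv_rhs => rw [← List.take_append_drop ((a :: b :: rest).length / 2) (a :: b :: rest)]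
    simp [PySem.List.pyGetD, PySem.List.pyGet?, PySem.List.pyIdx?]

-- A's interleaved fold computes the three column sums, componentwise.
theorem pv_fold_columns (l : List (List Int)) (a b c : Int) :
    l.foldl (fun (s : Int × Int × Int) votes =>
      (s.1 + PySem.List.pyGetD votes 0 0,
       s.2.1 + PySem.List.pyGetD votes 1 0,
       s.2.2 + PySem.List.pyGetD votes 2 0)) (a, b, c)
    = (a + (l.map (fun v => PySem.List.pyGetD v 0 0)).sum,
       b + (l.map (fun v => PySem.List.pyGetD v 1 0)).sum,
       c + (l.map (fun v => PySem.List.pyGetD v 2 0)).sum) := by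
  induction l generalizing a b c with
  | nil => simp
  | cons x xs ih =>
    simp only [List.foldl_cons, List.map_cons, List.sum_cons, ih]
    refine Prod.ext (by ring) (Prod.ext (by ring) (by ring))

-- ===== VERDICT (by name: the statement is the Claim_ definition above) =====
theorem inViteVote_spec : Claim_equal_inViteVote := by
  intro l _ _
  unfold Spec_inViteVote inViteVote inViteVote_alt
  simp only [pvColSums_eq, pv_fold_columns, zero_add]
  rfl
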